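-- pv_equiv track=rewrite | github.com/cBioPortal/cbioportal-mcp-qa | src/cbioportal_mcp_qa/evaluation.py | extract_answer_content
-- ===== SOURCE A (Python) =====
-- def extract_answer_content(llm_output: str) -> str:
--     """
--     Extract just the answer content from the LLM output markdown file.
--     Removes metadata sections like SQL queries and model information.
--
--     Args:
--         llm_output: Full markdown content from answer file
--
--     Returns:
--         Just the answer portion
--     """
--     # Split on common markdown separators
--     lines = llm_output.split('\n')
--     answer_lines = []
--     in_answer = False
--
--     for line in lines:
--         # Stop at metadata sections
--         if line.startswith('---') or line.startswith('## SQL Queries') or line.startswith('## Model Information'):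
--             break
--         # Start collecting after "Answer:" header if present
--         if '**Answer:**' in line:
--             in_answer = True
--             continue
--         if in_answer or (not line.startswith('#') and not line.startswith('**Question:**')):
--             answer_lines.append(line)
--
--     return '\n'.join(answer_lines).strip()
-- ===== SOURCE B (Python) =====
-- def extract_answer_content(llm_output: str) -> str:
--     """Extract just the answer content from the LLM output markdown file.
--
--     Index-based re-implementation: compute explicit boundary indices and slice,
--     instead of a one-pass latching flag.
--     """
--     lines = llm_output.split('\n')
--     meta = ('---', '## SQL Queries', '## Model Information')
--     stop = next((i for i, l in enumerate(lines) if l.startswith(meta)), len(lines))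
--     prefix = lines[:stop]
--     ans = next((i for i, l in enumerate(prefix) if '**Answer:**' in l), len(prefix))
--     head = [l for l in prefix[:ans] if not l.startswith(('#', '**Question:**'))]
--     body = [l for l in prefix[ans + 1:] if '**Answer:**' not in l]
--     return '\n'.join(head + body).strip()
-- ===== Notes on version B (the rewrite author's own statement) =====
-- stated objective: alternative
-- what changed: Replaced A's single pass with a latching in_answer flag by explicit boundary indices (first metadata line, first '**Answer:**' line) followed by slicing and filtering the resulting segments.
import Mathlib
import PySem

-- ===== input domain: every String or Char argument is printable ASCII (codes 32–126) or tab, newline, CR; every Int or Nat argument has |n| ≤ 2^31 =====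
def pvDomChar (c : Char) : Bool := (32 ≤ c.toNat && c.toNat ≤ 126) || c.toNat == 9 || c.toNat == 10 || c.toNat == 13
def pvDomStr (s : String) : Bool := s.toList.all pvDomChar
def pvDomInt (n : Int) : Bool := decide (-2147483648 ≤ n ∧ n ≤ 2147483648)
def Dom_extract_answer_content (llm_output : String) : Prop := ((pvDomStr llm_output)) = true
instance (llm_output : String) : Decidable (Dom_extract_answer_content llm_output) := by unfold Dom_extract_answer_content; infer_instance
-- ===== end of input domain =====

-- B replaces A's one-pass latching flag by explicit boundary indices (first metadata line,
-- first answer marker) plus slices; objective: alternative decomposition, same cost.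

-- ===== PORT A =====
-- line.startswith('---') or line.startswith('## SQL Queries') or line.startswith('## Model Information')
def pvStopLine (l : String) : Bool :=
  PySem.Str.startswith l "---" || PySem.Str.startswith l "## SQL Queries" ||
    PySem.Str.startswith l "## Model Information"

-- '**Answer:**' in line
def pvAnsLine (l : String) : Bool := PySem.Str.isIn "**Answer:**" l

-- not line.startswith('#') and not line.startswith('**Question:**')
def pvKeepLine (l : String) : Bool :=
  !PySem.Str.startswith l "#" && !PySem.Str.startswith l "**Question:**"

-- A's loop: state = in_answer flag; break / continue / append as in the Python
def pvLoopA (in_answer : Bool) : List String → List String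
  | [] => []
  | l :: ls =>
    if pvStopLine l then []
    else if pvAnsLine l then pvLoopA true ls
    else if in_answer || pvKeepLine l then l :: pvLoopA in_answer ls
    else pvLoopA in_answer ls

def extract_answer_content (llm_output : String) : String :=
  PySem.Str.strip (PySem.Str.join "\n" (pvLoopA false ((PySem.Str.split? llm_output "\n").getD [])))

-- ===== PORT B =====
def extract_answer_content_alt (llm_output : String) : String :=
  let lines := (PySem.Str.split? llm_output "\n").getD []
  let stop := (lines.findIdx? pvStopLine).getD lines.length
  let prefx := lines.take stop
  let ans := (prefx.findIdx? pvAnsLine).getD prefx.length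
  let head := (prefx.take ans).filter pvKeepLine
  let body := (prefx.drop (ans + 1)).filter (fun l => !pvAnsLine l)
  PySem.Str.strip (PySem.Str.join "\n" (head ++ body))

-- ===== PRECONDITION & SPEC =====
def Spec_extract_answer_content (llm_output : String) (out : String) : Prop := out = extract_answer_content_alt llm_output
instance (llm_output : String) (out : String) : Decidable (Spec_extract_answer_content llm_output out) := by unfold Spec_extract_answer_content; infer_instance

-- ===== CLAIM (what is proved, stated in full; the proofs are below) =====
def Claim_equal_extract_answer_content : Prop := ∀ (llm_output : String), Dom_extract_answer_content llm_output → Spec_extract_answer_content llm_output (extract_answer_content llm_output)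

-- ===== LEMMAS AND PROOFS =====

-- take up to the first index satisfying p (default length) = takeWhile (!p)
theorem pv_take_findIdx (p : String → Bool) (ls : List String) :
    ls.take ((ls.findIdx? p).getD ls.length) = ls.takeWhile (fun l => !p l) := by
  induction ls with
  | nil => simp
  | cons l t ih =>
    by_cases h : p l
    · simp [List.findIdx?_cons, h]
    · simp [List.findIdx?_cons, h, Option.getD_map, List.take_succ_cons]
      cases hf : t.findIdx? p <;> simpa [hf] using ih

-- after the flag has latched, A keeps every non-marker line until the break
theorem pv_loopA_true (ls : List String) :
    pvLoopA true ls = (ls.takeWhile (fun l => !pvStopLine l)).filter (fun l => !pvAnsLine l) := by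
  induction ls with
  | nil => simp [pvLoopA]
  | cons l t ih =>
    by_cases hs : pvStopLine l
    · simp [pvLoopA, hs]
    · by_cases ha : pvAnsLine l <;> simp [pvLoopA, hs, ha, ih]

-- A's whole loop equals B's index-and-slice computation on the truncated prefix
theorem pv_loopA_false (ls : List String) :
    pvLoopA false ls =
      (let prefx := ls.takeWhile (fun l => !pvStopLine l)
       let ans := (prefx.findIdx? pvAnsLine).getD prefx.length
       (prefx.take ans).filter pvKeepLine ++
         (prefx.drop (ans + 1)).filter (fun l => !pvAnsLine l)) := by
  induction ls with
  | nil => simp [pvLoopA]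
  | cons l t ih =>
    by_cases hs : pvStopLine l
    · simp [pvLoopA, hs]
    · by_cases ha : pvAnsLine l
      · simp [pvLoopA, hs, ha, pv_loopA_true, List.findIdx?_cons]
      · simp only [pvLoopA, hs, ha, Bool.false_or, List.takeWhile_cons,
          Bool.not_false, if_true, List.findIdx?_cons] at *
        cases hf : (t.takeWhile (fun l => !pvStopLine l)).findIdx? pvAnsLine with
        | none =>
          simp [hf] at ih ⊢
          by_cases hk : pvKeepLine l <;>
            simp [hk, ih]
        | some i =>
          simp [hf] at ih ⊢
          by_cases hk : pvKeepLine l <;>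
            simp [hk, ih]

-- ===== VERDICT (by name: the statement is the Claim_ definition above) =====
theorem extract_answer_content_spec : Claim_equal_extract_answer_content := by
  intro s _
  unfold Spec_extract_answer_content extract_answer_content extract_answer_content_alt
  simp only [pv_loopA_false, pv_take_findIdx]
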